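-- pv_equiv track=rewrite | github.com/Deepak-Urs/github-main | Python/dsaOne/problem-solving/step-7: Recursion/Hard problems/printNBitBinNos.py | printNBitBinNos
-- ===== SOURCE A (Python) =====
-- def printNBitBinNos(one, zero, n, op, res): # #1s > #0s
--     if n == 0:
--         res.append(op)
--         return
--
--     op1 = op + "1"
--     printNBitBinNos(one+1, zero, n-1, op1, res)
--
--     if one > zero:
--         op2 = op + "0"
--         printNBitBinNos(one, zero+1, n-1, op2, res)
--
--     return res
-- ===== SOURCE B (Python) =====
-- def printNBitBinNos(one, zero, n, op, res):
--     # Explicit LIFO stack instead of recursion; mutates res like the original.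
--     stack = [(one, zero, n, op)]
--     while stack:
--         o, z, m, s = stack.pop()
--         if m == 0:
--             res.append(s)
--         else:
--             if o > z:
--                 stack.append((o, z + 1, m - 1, s + "0"))
--             stack.append((o + 1, z, m - 1, s + "1"))
--     return res
-- ===== Notes on version B (the rewrite author's own statement) =====
-- stated objective: alternative
-- what changed: Replaced the recursion with an explicit LIFO stack of (one, zero, n, op) states popped in a loop, pushing the '0'-child before the '1'-child so the preorder of appends is preserved.
-- outside the precondition, e.g. on printNBitBinNos(0, 0, 0, '', []): A returns None, B returns ['']
import Mathlib
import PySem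

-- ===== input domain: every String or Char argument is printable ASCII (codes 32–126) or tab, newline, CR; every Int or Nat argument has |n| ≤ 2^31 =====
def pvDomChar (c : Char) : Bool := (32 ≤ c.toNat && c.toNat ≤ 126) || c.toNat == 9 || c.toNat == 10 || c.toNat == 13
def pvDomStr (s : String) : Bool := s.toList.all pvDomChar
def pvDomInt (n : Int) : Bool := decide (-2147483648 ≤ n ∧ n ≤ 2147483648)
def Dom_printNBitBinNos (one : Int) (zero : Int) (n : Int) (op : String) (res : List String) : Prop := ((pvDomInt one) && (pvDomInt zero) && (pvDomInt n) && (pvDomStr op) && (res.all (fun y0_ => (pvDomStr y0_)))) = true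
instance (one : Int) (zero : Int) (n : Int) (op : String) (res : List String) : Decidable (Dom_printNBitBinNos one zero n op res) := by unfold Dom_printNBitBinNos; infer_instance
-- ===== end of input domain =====

-- B replaces the recursion by an explicit LIFO stack loop (same appends, same order);
-- equivalence is about the returned list (Python A/B both mutate `res` in place the same way inside Pre_).

-- ===== PORT A =====
-- Literal port of A's recursion; the `n < 0` branch is only a totality guard
-- (Python recurses forever / raises RecursionError there; outside Pre_).
def printNBitBinNos (one : Int) (zero : Int) (n : Int) (op : String) (res : List String) : List String :=
  if n = 0 then res ++ [op]
  else if n < 0 then res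
  else
    let op1 := op ++ "1"
    let res1 := printNBitBinNos (one + 1) zero (n - 1) op1 res
    if one > zero then
      let op2 := op ++ "0"
      printNBitBinNos one (zero + 1) (n - 1) op2 res1
    else res1
termination_by n.toNat
decreasing_by all_goals omega

-- ===== PORT B =====
-- One iteration of Source B's `while stack:` loop per unit of fuel; the fuel bound
-- 2^(n+1) only makes the loop total (it is never reached when the initial n > 0).
def pvStepB (fuel : Nat) (stack : List (Int × Int × Int × String)) (res : List String) : List String :=
  match fuel with
  | 0 => res
  | fuel + 1 =>
    match stack with
    | [] => res
    | (o, z, m, s) :: rest =>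
      if m == 0 then pvStepB fuel rest (res ++ [s])
      else
        pvStepB fuel
          ((o + 1, z, m - 1, s ++ "1") ::
            ((if o > z then [(o, z + 1, m - 1, s ++ "0")] else []) ++ rest)) res

def printNBitBinNos_alt (one : Int) (zero : Int) (n : Int) (op : String) (res : List String) : List String :=
  pvStepB (2 ^ (n.toNat + 1)) [(one, zero, n, op)] res

-- ===== PRECONDITION & SPEC =====
-- Pre_ excludes n = 0, where A appends op but returns None (not a list of strings),
-- and n < 0, where A recurses without bound and raises RecursionError.
def Pre_printNBitBinNos (one : Int) (zero : Int) (n : Int) (op : String) (res : List String) : Prop := 0 < n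
instance (one : Int) (zero : Int) (n : Int) (op : String) (res : List String) : Decidable (Pre_printNBitBinNos one zero n op res) := by unfold Pre_printNBitBinNos; infer_instance
def pvWitness_printNBitBinNos : Int × Int × Int × String × List String := (1, 0, 3, "1", ["x"])

def Spec_printNBitBinNos (one : Int) (zero : Int) (n : Int) (op : String) (res : List String) (out : List String) : Prop := out = printNBitBinNos_alt one zero n op res
instance (one : Int) (zero : Int) (n : Int) (op : String) (res : List String) (out : List String) : Decidable (Spec_printNBitBinNos one zero n op res out) := by unfold Spec_printNBitBinNos; infer_instance

-- ===== CLAIM (what is proved, stated in full; the proofs are below) =====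
def Claim_equal_printNBitBinNos : Prop := ∀ (one : Int) (zero : Int) (n : Int) (op : String) (res : List String), Dom_printNBitBinNos one zero n op res → Pre_printNBitBinNos one zero n op res → Spec_printNBitBinNos one zero n op res (printNBitBinNos one zero n op res)

-- ===== LEMMAS AND PROOFS =====

-- Exact number of loop iterations B spends on the subtree rooted at (o, z, m).
def pvCost (o z : Int) (m : Nat) : Nat :=
  match m with
  | 0 => 1
  | m + 1 => 1 + pvCost (o + 1) z m + (if o > z then pvCost o (z + 1) m else 0)

theorem pvCost_le (o z : Int) (m : Nat) : pvCost o z m ≤ 2 ^ (m + 1) - 1 := by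
  induction m generalizing o z with
  | zero => simp [pvCost]
  | succ m ih =>
    have h1 := ih (o + 1) z
    have h2 := ih o (z + 1)
    have hp : 1 ≤ 2 ^ (m + 1) := Nat.one_le_two_pow
    simp only [pvCost, pow_succ]
    split <;> omega

theorem pA_zero (o z : Int) (s : String) (res : List String) :
    printNBitBinNos o z 0 s res = res ++ [s] := by
  rw [printNBitBinNos]; simp

theorem pA_succ (o z : Int) (m : Nat) (s : String) (res : List String) :
    printNBitBinNos o z ((m : Int) + 1) s res =
      (let res1 := printNBitBinNos (o + 1) z (m : Int) (s ++ "1") res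
       if o > z then printNBitBinNos o (z + 1) (m : Int) (s ++ "0") res1 else res1) := by
  rw [printNBitBinNos, if_neg (by omega), if_neg (by omega)]
  have h : (m : Int) + 1 - 1 = (m : Int) := by ring
  rw [h]

-- Main invariant: with exactly pvCost fuel (plus any surplus), processing the top
-- stack entry (o, z, m, s) appends the same strings as A's recursion on it.
theorem pvStepB_run (m : Nat) :
    ∀ (o z : Int) (s : String) (rest : List (Int × Int × Int × String))
      (res : List String) (fuel : Nat),
      pvStepB (fuel + pvCost o z m) ((o, z, (↑m : Int), s) :: rest) res =
        pvStepB fuel rest (printNBitBinNos o z (↑m : Int) s res) := by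
  induction m with
  | zero =>
    intro o z s rest res fuel
    simp [pvCost, pvStepB, pA_zero]
  | succ m ih =>
    intro o z s rest res fuel
    have hcast : ((↑(m + 1) : Int)) = (m : Int) + 1 := by push_cast; ring
    have h0 : (((m : Int) + 1) == 0) = false := by simp; omega
    have h1 : (m : Int) + 1 - 1 = (m : Int) := by ring
    rw [hcast, pA_succ]
    by_cases hz : o > z
    · have hc : fuel + pvCost o z (m + 1)
          = (((fuel + pvCost o (z + 1) m) + pvCost (o + 1) z m) + 1) := by
        simp [pvCost, hz]; ring
      rw [hc, pvStepB]
      simp only [h0, if_false, h1, hz, if_pos, List.cons_append, List.nil_append]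
      rw [ih (o + 1) z (s ++ "1"), ih o (z + 1) (s ++ "0")]
      simp [hz]
    · have hc : fuel + pvCost o z (m + 1)
          = ((fuel + pvCost (o + 1) z m) + 1) := by
        simp [pvCost, hz]; ring
      rw [hc, pvStepB]
      simp only [h0, if_false, h1, hz, if_neg, if_false, List.nil_append]
      rw [ih (o + 1) z (s ++ "1")]
      simp [hz]

theorem pvStepB_nil (fuel : Nat) (res : List String) : pvStepB fuel [] res = res := by
  cases fuel <;> rfl

-- ===== VERDICT (by name: the statement is the Claim_ definition above) =====
theorem printNBitBinNos_spec : Claim_equal_printNBitBinNos := by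
  intro one zero n op res _ hpre
  unfold Spec_printNBitBinNos printNBitBinNos_alt
  obtain ⟨m, rfl⟩ : ∃ m : Nat, n = (m : Int) :=
    ⟨n.toNat, (Int.toNat_of_nonneg (le_of_lt hpre)).symm⟩
  rw [Int.toNat_natCast]
  have hle : pvCost one zero m ≤ 2 ^ (m + 1) := by
    have h1 := pvCost_le one zero m
    have h2 : (1 : Nat) ≤ 2 ^ (m + 1) := Nat.one_le_two_pow
    omega
  have hf : 2 ^ (m + 1) = (2 ^ (m + 1) - pvCost one zero m) + pvCost one zero m := by omega
  rw [hf, pvStepB_run, pvStepB_nil]
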